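-- pv_equiv track=rewrite | github.com/vjeromel276/es-to-bbf-migration | day-two/tools/generate_off_net_mapping_semantic.py | map_picklist_value
-- ===== SOURCE A (Python) =====
-- def map_picklist_value(es_value, bbf_values):
--     """
--     Map an ES picklist value to a BBF value.
--     Returns: (suggested_value, match_type)
--     """
--     es_lower = es_value.lower().strip()
--
--     # Exact match (case insensitive)
--     for bbf_val in bbf_values:
--         if bbf_val.lower().strip() == es_lower:
--             return (bbf_val, 'Exact Match')
--
--     # Close match - check for substring or very similar
--     for bbf_val in bbf_values:
--         bbf_lower = bbf_val.lower().strip()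
--         # Check if one contains the other
--         if es_lower in bbf_lower or bbf_lower in es_lower:
--             return (bbf_val, 'Close Match')
--
--     # No match - return all options
--     all_values = ' | '.join(bbf_values)
--     return (all_values, 'No Match - Select from list')
-- ===== SOURCE B (Python) =====
-- def map_picklist_value(es_value, bbf_values):
--     """
--     Map an ES picklist value to a BBF value.
--     Returns: (suggested_value, match_type)
--     """
--     es_lower = es_value.lower().strip()
--     close = None
--     for bbf_val in bbf_values:
--         bbf_lower = bbf_val.lower().strip()
--         if bbf_lower == es_lower:
--             return (bbf_val, 'Exact Match')
--         if close is None and (es_lower in bbf_lower or bbf_lower in es_lower):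
--             close = bbf_val
--     if close is not None:
--         return (close, 'Close Match')
--     return (' | '.join(bbf_values), 'No Match - Select from list')
-- ===== Notes on version B (the rewrite author's own statement) =====
-- stated objective: alternative
-- what changed: Two sequential scans (exact pass, then substring pass) merged into one pass that returns immediately on an exact match and remembers the first close match in an accumulator for use after the loop.
import Mathlib
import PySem

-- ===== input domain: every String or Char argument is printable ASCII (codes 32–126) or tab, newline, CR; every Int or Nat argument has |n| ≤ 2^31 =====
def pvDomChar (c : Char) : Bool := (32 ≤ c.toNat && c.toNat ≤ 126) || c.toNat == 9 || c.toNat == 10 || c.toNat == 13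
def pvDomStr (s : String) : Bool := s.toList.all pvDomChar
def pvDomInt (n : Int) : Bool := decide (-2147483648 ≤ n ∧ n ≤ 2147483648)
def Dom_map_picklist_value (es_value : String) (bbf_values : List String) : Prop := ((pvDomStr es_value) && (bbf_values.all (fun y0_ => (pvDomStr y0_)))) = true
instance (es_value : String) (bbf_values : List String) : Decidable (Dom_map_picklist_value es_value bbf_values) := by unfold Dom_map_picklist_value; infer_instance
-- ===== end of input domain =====

-- B merges A's two sequential scans into one pass that returns on an exact match and
-- remembers the first close match in an accumulator (objective: alternative decomposition).

-- ===== PORT A =====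
-- first loop of A: first bbf_val whose lower().strip() equals es_lower
def pvAExact (es_lower : String) : List String → Option String
  | [] => none
  | v :: rest =>
      if PySem.Str.strip (PySem.Str.lower v) == es_lower then some v
      else pvAExact es_lower rest

-- second loop of A: first bbf_val whose stripped lowering contains / is contained in es_lower
def pvAClose (es_lower : String) : List String → Option String
  | [] => none
  | v :: rest =>
      let bbf_lower := PySem.Str.strip (PySem.Str.lower v)
      if PySem.Str.isIn es_lower bbf_lower || PySem.Str.isIn bbf_lower es_lower then some v
      else pvAClose es_lower rest

def map_picklist_value (es_value : String) (bbf_values : List String) : String × String :=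
  let es_lower := PySem.Str.strip (PySem.Str.lower es_value)
  match pvAExact es_lower bbf_values with
  | some v => (v, "Exact Match")
  | none =>
    match pvAClose es_lower bbf_values with
    | some v => (v, "Close Match")
    | none => (PySem.Str.join " | " bbf_values, "No Match - Select from list")

-- ===== PORT B =====
-- B's single loop: return on exact match, remember the first close match in `close`
def pvBLoop (es_lower : String) (all : List String) (close : Option String) :
    List String → String × String
  | [] =>
      match close with
      | some c => (c, "Close Match")
      | none => (PySem.Str.join " | " all, "No Match - Select from list")
  | v :: rest =>
      let bbf_lower := PySem.Str.strip (PySem.Str.lower v)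
      if bbf_lower == es_lower then (v, "Exact Match")
      else if close.isNone &&
          (PySem.Str.isIn es_lower bbf_lower || PySem.Str.isIn bbf_lower es_lower) then
        pvBLoop es_lower all (some v) rest
      else
        pvBLoop es_lower all close rest

def map_picklist_value_alt (es_value : String) (bbf_values : List String) : String × String :=
  pvBLoop (PySem.Str.strip (PySem.Str.lower es_value)) bbf_values none bbf_values

-- ===== PRECONDITION & SPEC =====
def Spec_map_picklist_value (es_value : String) (bbf_values : List String) (out : String × String) : Prop := out = map_picklist_value_alt es_value bbf_values
instance (es_value : String) (bbf_values : List String) (out : String × String) : Decidable (Spec_map_picklist_value es_value bbf_values out) := by unfold Spec_map_picklist_value; infer_instance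

-- ===== CLAIM (what is proved, stated in full; the proofs are below) =====
def Claim_equal_map_picklist_value : Prop := ∀ (es_value : String) (bbf_values : List String), Dom_map_picklist_value es_value bbf_values → Spec_map_picklist_value es_value bbf_values (map_picklist_value es_value bbf_values)

-- ===== LEMMAS AND PROOFS =====

-- Invariant of B's loop: an exact match in the remaining list wins; otherwise the
-- recorded close match (or, failing that, the first close match in the rest) is used.
theorem pvBLoop_eq (es : String) (allv : List String) :
    ∀ (l : List String) (close : Option String),
      pvBLoop es allv close l =
        match pvAExact es l with
        | some v => (v, "Exact Match")
        | none =>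
          match (match close with | some c => some c | none => pvAClose es l) with
          | some c => (c, "Close Match")
          | none => (PySem.Str.join " | " allv, "No Match - Select from list") := by
  intro l
  induction l with
  | nil =>
      intro close
      cases close <;> simp [pvBLoop, pvAExact, pvAClose]
  | cons v rest ih =>
      intro close
      by_cases he : (PySem.Str.strip (PySem.Str.lower v) == es) = true
      · simp [pvBLoop, pvAExact, he]
      · cases close with
        | some c =>
            simp [pvBLoop, pvAExact, he, ih]
        | none =>
            by_cases ht : PySem.Chars.isIn es.toList (PySem.Chars.strip (PySem.Chars.lower v.toList)) = true ∨
                PySem.Chars.isIn (PySem.Chars.strip (PySem.Chars.lower v.toList)) es.toList = true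
            · simp [pvBLoop, pvAExact, pvAClose, he, ht, ih]
            · simp [pvBLoop, pvAExact, pvAClose, he, ht, ih]

-- ===== VERDICT (by name: the statement is the Claim_ definition above) =====
theorem map_picklist_value_spec : Claim_equal_map_picklist_value := by
  intro es_value bbf_values _
  unfold Spec_map_picklist_value map_picklist_value map_picklist_value_alt
  rw [pvBLoop_eq (PySem.Str.strip (PySem.Str.lower es_value)) bbf_values bbf_values none]
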